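-- pv_equiv track=rewrite | github.com/GEMTechnologies/granadathesis | backend/lightweight/services/good_study_tools_generator.py | _open_question_block
-- ===== SOURCE A (Python) =====
-- from typing import List, Optional
--
-- def _open_question_block(questions: List[str]) -> str:
--     lines: List[str] = []
--     for idx, question in enumerate(questions, 1):
--         lines.append(f"{idx}. {question}")
--         lines.append("__________")
--         lines.append("__________")
--         lines.append("__________")
--         lines.append("")
--     return "\n".join(lines).strip()
-- ===== SOURCE B (Python) =====
-- def _open_question_block(questions):
--     if not questions:
--         return ""
--     headers = [f"{idx}. {question}" for idx, question in enumerate(questions, 1)]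
--     answers = "\n__________\n__________\n__________"
--     return (answers + "\n\n").join(headers) + answers
-- ===== Notes on version B (the rewrite author's own statement) =====
-- stated objective: simpler
-- what changed: B generates only the numbered header per question and treats the three-underscore answer block as a constant separator: headers are joined with (answer block + blank line) and one trailing answer block is appended, eliminating A's flat per-line accumulator, its blank-string sentinel entries and the final .strip().
import Mathlib
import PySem

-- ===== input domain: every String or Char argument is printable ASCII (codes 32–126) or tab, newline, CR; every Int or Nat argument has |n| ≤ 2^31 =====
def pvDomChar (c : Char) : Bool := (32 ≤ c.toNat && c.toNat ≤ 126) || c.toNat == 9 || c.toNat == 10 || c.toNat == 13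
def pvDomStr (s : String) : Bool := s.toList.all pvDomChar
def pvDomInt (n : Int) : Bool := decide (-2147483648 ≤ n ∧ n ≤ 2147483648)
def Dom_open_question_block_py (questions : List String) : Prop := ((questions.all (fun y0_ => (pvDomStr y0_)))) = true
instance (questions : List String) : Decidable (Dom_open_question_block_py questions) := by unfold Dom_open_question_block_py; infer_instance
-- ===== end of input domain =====

-- B generates only the numbered headers and joins them with the constant three-underscore
-- answer block as separator (plus one trailing block), replacing A's per-line accumulator
-- with sentinel "" entries and final .strip().


-- ===== PORT A =====
-- "__________" (ten underscores), shared literal of both Pythons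
def pvU : List Char := ['_','_','_','_','_','_','_','_','_','_']

-- f"{idx}. {question}"
def pvHeader (i : Int) (q : List Char) : List Char :=
  PySem.Int.toChars i ++ ['.', ' '] ++ q

def open_question_block_py (questions : List String) : String :=
  let lines : List (List Char) :=
    (PySem.List.enumerate (questions.map String.toList) 1).foldl
      (fun lines iq => lines ++ [pvHeader iq.1 iq.2, pvU, pvU, pvU, []]) []
  String.ofList (PySem.Chars.strip (PySem.Chars.join ['\n'] lines))

-- ===== PORT B =====
-- the constant answer block "\n__________\n__________\n__________" of Source B
def pvAns : List Char := '\n' :: pvU ++ '\n' :: pvU ++ '\n' :: pvU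

def open_question_block_py_alt (questions : List String) : String :=
  if questions.isEmpty then ""
  else
    String.ofList
      (PySem.Chars.join (pvAns ++ ['\n', '\n'])
        ((PySem.List.enumerate (questions.map String.toList) 1).map
          (fun iq => pvHeader iq.1 iq.2)) ++ pvAns)

-- ===== PRECONDITION & SPEC =====
def Spec_open_question_block_py (questions : List String) (out : String) : Prop := out = open_question_block_py_alt questions
instance (questions : List String) (out : String) : Decidable (Spec_open_question_block_py questions out) := by unfold Spec_open_question_block_py; infer_instance

-- ===== CLAIM =====
def Claim_equal_open_question_block_py : Prop := ∀ (questions : List String), Dom_open_question_block_py questions → Spec_open_question_block_py questions (open_question_block_py questions)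

-- ===== LEMMAS AND PROOFS =====

-- the full block for one question, a term of the proofs only (B never builds it)
def pvBlock (i : Int) (q : List Char) : List Char :=
  pvHeader i q ++ '\n' :: pvU ++ '\n' :: pvU ++ '\n' :: pvU

-- B's header join with answer-block separator + trailing block = the "\n\n"-join of full blocks
theorem pv_headers_join (p : Int × List Char) (e : List (Int × List Char)) :
    PySem.Chars.join (pvAns ++ ['\n', '\n']) ((p :: e).map (fun iq => pvHeader iq.1 iq.2)) ++ pvAns =
      PySem.Chars.join ['\n', '\n'] ((p :: e).map (fun iq => pvBlock iq.1 iq.2)) := by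
  induction e generalizing p with
  | nil => simp [PySem.Chars.join_singleton, pvBlock, pvAns]
  | cons p2 e2 ih =>
      have h := ih p2
      simp only [List.map_cons, PySem.Chars.join_cons_cons] at h ⊢
      rw [List.append_assoc, List.append_assoc, h]
      simp [pvBlock, pvAns]

-- A's line list, after foldl_append_eq_flatMap
def pvLinesOf (e : List (Int × List Char)) : List (List Char) :=
  e.flatMap (fun iq => [pvHeader iq.1 iq.2, pvU, pvU, pvU, []])

-- joining A's lines with "\n" = joining the blocks with "\n\n", plus one trailing "\n"
theorem pv_join_flat (p : Int × List Char) (e : List (Int × List Char)) :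
    PySem.Chars.join ['\n'] (pvLinesOf (p :: e)) =
      PySem.Chars.join ['\n', '\n'] ((p :: e).map (fun iq => pvBlock iq.1 iq.2)) ++ ['\n'] := by
  induction e generalizing p with
  | nil =>
      simp [pvLinesOf, pvBlock, PySem.Chars.join_cons_cons, PySem.Chars.join_singleton]
  | cons p2 e2 ih =>
      have h2 := ih p2
      simp only [pvLinesOf, List.flatMap_cons] at h2 ⊢
      simp only [List.cons_append, List.nil_append,
        PySem.Chars.join_cons_cons, List.map_cons] at h2 ⊢
      cases hfe : (e2.flatMap (fun iq => [pvHeader iq.1 iq.2, pvU, pvU, pvU, []])) with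
      | nil =>
          cases e2 with
          | nil =>
              simp only [List.flatMap_nil, List.map_nil] at h2 ⊢
              simp [PySem.Chars.join_singleton, pvBlock]
          | cons a l => simp [List.flatMap_cons] at hfe
      | cons z zs =>
          rw [hfe] at h2
          simp only [PySem.Chars.join_cons_cons] at h2 ⊢
          rw [h2]
          simp [pvBlock]

-- a joined list is prefixed by its first block
theorem pv_join_prefix (sep b : List Char) (l : List (List Char)) :
    ∃ t, PySem.Chars.join sep (b :: l) = b ++ t := by
  cases l with
  | nil => exact ⟨[], by simp [PySem.Chars.join_singleton]⟩
  | cons c l' => exact ⟨sep ++ PySem.Chars.join sep (c :: l'),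
      by rw [PySem.Chars.join_cons_cons]; simp⟩

-- every joined nonempty block list ends in '_'
theorem pv_ends_underscore (p : Int × List Char) (e : List (Int × List Char)) :
    ∃ ys, PySem.Chars.join ['\n', '\n'] ((p :: e).map (fun iq => pvBlock iq.1 iq.2)) = ys ++ ['_'] := by
  induction e generalizing p with
  | nil =>
      refine ⟨pvBlock p.1 p.2 |>.dropLast, ?_⟩
      simp [PySem.Chars.join_singleton, pvBlock, pvU]
  | cons p2 e2 ih =>
      obtain ⟨ys, hys⟩ := ih p2
      refine ⟨pvBlock p.1 p.2 ++ ['\n', '\n'] ++ ys, ?_⟩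
      simp only [List.map_cons] at hys ⊢
      rw [PySem.Chars.join_cons_cons, hys]
      simp

-- .strip() only removes the trailing newline when the string starts with '1' and ends with '_'
theorem pv_strip_trailing (cs : List Char)
    (h1 : ∃ zs, cs = '1' :: zs) (h2 : ∃ ys, cs = ys ++ ['_']) :
    PySem.Chars.strip (cs ++ ['\n']) = cs := by
  obtain ⟨zs, hzs⟩ := h1
  obtain ⟨ys, hys⟩ := h2
  simp only [PySem.Chars.strip, PySem.Chars.lstrip, PySem.Chars.rstrip]
  rw [hzs, show ('1' :: zs) ++ ['\n'] = '1' :: (zs ++ ['\n']) from rfl,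
    List.dropWhile_cons_of_neg (by decide),
    show '1' :: (zs ++ ['\n']) = ('1' :: zs) ++ ['\n'] from rfl, ← hzs, hys]
  simp only [List.reverse_append, List.reverse_cons, List.reverse_nil, List.nil_append,
    List.append_assoc, List.singleton_append]
  rw [show (['\n', '_'] ++ ys.reverse) = '\n' :: '_' :: ys.reverse from rfl,
    List.dropWhile_cons_of_pos (by decide), List.dropWhile_cons_of_neg (by decide)]
  simp

theorem open_question_block_py_spec_aux (questions : List String) :
    open_question_block_py questions = open_question_block_py_alt questions := by
  cases questions with
  | nil => rfl
  | cons q qs =>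
      unfold open_question_block_py open_question_block_py_alt
      simp only [List.isEmpty_cons, if_neg Bool.false_ne_true, List.map_cons,
        PySem.List.enumerate_cons, PySem.List.foldl_append_eq_flatMap, List.nil_append]
      set e := PySem.List.enumerate (qs.map String.toList) (1 + 1) with he
      have hj := pv_join_flat (1, q.toList) e
      simp only [pvLinesOf] at hj
      rw [hj]
      have hh := pv_headers_join (1, q.toList) e
      rw [List.map_cons] at hh
      rw [hh]
      congr 1
      refine pv_strip_trailing _ ?_ (pv_ends_underscore (1, q.toList) e)
      obtain ⟨t, ht⟩ := pv_join_prefix ['\n', '\n']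
        (pvBlock 1 q.toList) (e.map (fun iq => pvBlock iq.1 iq.2))
      rw [List.map_cons] at *
      exact ⟨'.' :: ' ' :: (q.toList ++ '\n' :: (pvU ++ '\n' :: (pvU ++ '\n' :: pvU))) ++ t,
        by rw [ht]; simp [pvBlock, pvHeader, show PySem.Int.toChars 1 = ['1'] by decide]⟩

-- ===== VERDICT =====
theorem open_question_block_py_spec : Claim_equal_open_question_block_py := by
  intro questions _
  exact open_question_block_py_spec_aux questions
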